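-- pv_equiv track=rewrite | github.com/kkr010128/codebert | problem132/problem132_124.py | update
-- ===== SOURCE A (Python) =====
-- def update(A,N):
--     B=[0 for i in range(N+1)]
--
--     for i in range(N):
--         l = max(0,i-A[i])
--         r = min(N,i+A[i]+1)
--         B[l]+=1
--         B[r]-=1
--     x = A[0] == B[0]
--     A[0]=B[0]
--     for i in range(1,N):
--         B[i]+=B[i-1]
--         x = x and A[i] == B[i]
--         A[i]=B[i]
--     return x
-- ===== SOURCE B (Python) =====
-- def update(A, N):
--     C = [0 for _ in range(N + 1)]
--     for i in range(N):
--         l = max(0, i - A[i])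
--         r = min(N, i + A[i] + 1)
--         for j in range(l, r):
--             C[j] += 1
--     x = A[0] == C[0]
--     A[0] = C[0]
--     for i in range(1, N):
--         x = x and A[i] == C[i]
--         A[i] = C[i]
--     return x
-- ===== Notes on version B (the rewrite author's own statement) =====
-- stated objective: alternative
-- what changed: B computes each cell's coverage by directly incrementing every index of each interval [l,r) in a nested loop and only then runs the comparison pass, instead of A's difference array of +1/-1 endpoint marks with an in-place prefix sum interleaved with the comparison.
-- outside the precondition, e.g. on update([-1], 1): A returns True, B returns False
import Mathlib
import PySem

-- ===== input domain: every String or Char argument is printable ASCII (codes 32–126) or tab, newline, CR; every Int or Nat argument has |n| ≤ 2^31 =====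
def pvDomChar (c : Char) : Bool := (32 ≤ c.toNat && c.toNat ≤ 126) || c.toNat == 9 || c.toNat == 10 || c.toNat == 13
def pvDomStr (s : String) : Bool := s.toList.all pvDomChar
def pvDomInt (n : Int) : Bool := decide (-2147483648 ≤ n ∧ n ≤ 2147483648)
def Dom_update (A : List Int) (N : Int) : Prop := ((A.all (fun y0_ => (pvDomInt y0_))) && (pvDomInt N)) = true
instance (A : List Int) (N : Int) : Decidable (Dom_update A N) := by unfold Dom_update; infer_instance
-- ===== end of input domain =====

-- B replaces A's difference array + in-place prefix sum (interleaved with the comparison) by a direct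
-- nested count of every covered cell, then a separate comparison pass (objective: alternative algorithm).
-- Both Pythons mutate A in place (A[i]=B[i] / A[i]=C[i]); the equivalence proved here is about the RETURN value only.

-- shared index helpers: both Pythons compute A[i], l = max(0, i-A[i]), r = min(N, i+A[i]+1) identically
def pvA (A : List Int) (i : Int) : Int := PySem.List.pyGetD A i 0
def pvL (A : List Int) (i : Int) : Int := max 0 (i - pvA A i)
def pvR (A : List Int) (N i : Int) : Int := min N (i + pvA A i + 1)

-- ===== PORT A =====
-- B[l]+=1 ; B[r]-=1  (pySetD/pyGetD: Pre_ keeps every touched index in range, so the total forms are exact)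
def diffStep (A : List Int) (N : Int) (B : List Int) (i : Int) : List Int :=
  let B1 := PySem.List.pySetD B (pvL A i) (PySem.List.pyGetD B (pvL A i) 0 + 1)
  PySem.List.pySetD B1 (pvR A N i) (PySem.List.pyGetD B1 (pvR A N i) 0 - 1)

-- B[i]+=B[i-1] ; x = x and A[i]==B[i]  (A[i] is read before the Python writes A[i], so the mutation of A
-- never feeds back into the result; the port carries the B-list and x as the loop state)
def fixStep (A : List Int) (s : List Int × Bool) (i : Int) : List Int × Bool :=
  let B' := PySem.List.pySetD s.1 i (PySem.List.pyGetD s.1 i 0 + PySem.List.pyGetD s.1 (i-1) 0)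
  (B', s.2 && decide (pvA A i = PySem.List.pyGetD B' i 0))

def update (A : List Int) (N : Int) : Bool :=
  let B0 : List Int := (PySem.List.pyRange 0 (N+1) 1).map (fun _ => 0)
  let B1 := (PySem.List.pyRange 0 N 1).foldl (diffStep A N) B0
  let x0 := decide (pvA A 0 = PySem.List.pyGetD B1 0 0)
  ((PySem.List.pyRange 1 N 1).foldl (fixStep A) (B1, x0)).2

-- ===== PORT B =====
-- for j in range(l, r): C[j] += 1
def incrRange (C : List Int) (l r : Int) : List Int :=
  (PySem.List.pyRange l r 1).foldl (fun C j => PySem.List.pySetD C j (PySem.List.pyGetD C j 0 + 1)) C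

def covStep (A : List Int) (N : Int) (C : List Int) (i : Int) : List Int :=
  incrRange C (pvL A i) (pvR A N i)

-- x = x and A[i]==C[i]  (the finished count list C is read only)
def cmpStep (A : List Int) (C : List Int) (x : Bool) (i : Int) : Bool :=
  x && decide (pvA A i = PySem.List.pyGetD C i 0)

def update_alt (A : List Int) (N : Int) : Bool :=
  let C0 : List Int := (PySem.List.pyRange 0 (N+1) 1).map (fun _ => 0)
  let C := (PySem.List.pyRange 0 N 1).foldl (covStep A N) C0
  let x0 := decide (pvA A 0 = PySem.List.pyGetD C 0 0)
  (PySem.List.pyRange 1 N 1).foldl (cmpStep A C) x0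

-- ===== PRECONDITION & SPEC =====
-- Pre_ restricts to the task's natural domain: 0 <= N <= len(A), A nonempty, and nonnegative ranges among
-- the first N entries.  Negative entries are excluded because A's inverted difference intervals and Python
-- negative-index wraparound then yield accidental coverage values (or IndexError); N < 0, N > len(A) and
-- empty A raise IndexError in both programs.
def Pre_update (A : List Int) (N : Int) : Prop :=
  0 ≤ N ∧ N ≤ (A.length : Int) ∧ 1 ≤ (A.length : Int) ∧ ∀ x ∈ A.take N.toNat, 0 ≤ x
instance (A : List Int) (N : Int) : Decidable (Pre_update A N) := by unfold Pre_update; infer_instance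

def pvWitness_update : List Int × Int := ([2, 0, 1], 3)

def Spec_update (A : List Int) (N : Int) (out : Bool) : Prop := out = update_alt A N
instance (A : List Int) (N : Int) (out : Bool) : Decidable (Spec_update A N out) := by unfold Spec_update; infer_instance

-- ===== CLAIM (what is proved, stated in full; the proofs are below) =====
def Claim_equal_update : Prop := ∀ (A : List Int) (N : Int), Dom_update A N → Pre_update A N → Spec_update A N (update A N)

-- ===== LEMMAS AND PROOFS =====

-- the mathematical coverage count of cell j, common value of both programs
def cov (A : List Int) (N j : Int) : Int :=
  ((PySem.List.pyRange 0 N 1).map (fun i => if pvL A i ≤ j ∧ j < pvR A N i then (1:Int) else 0)).sum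

-- prefix sum of the difference list D up to Int index j ≥ 0
def psum (D : List Int) (j : Int) : Int := ((D.take (j.toNat + 1)).sum)

theorem sum_set_int (xs : List Int) (k : Nat) (v : Int) (h : k < xs.length) :
    (xs.set k v).sum = xs.sum - xs.getD k 0 + v := by
  induction xs generalizing k with
  | nil => simp at h
  | cons a t ih =>
    cases k with
    | zero => simp [List.set]; ring
    | succ k =>
      simp only [List.set, List.sum_cons, List.getD_cons_succ]
      rw [ih k (by simpa using h)]; ring

theorem sum_take_set (xs : List Int) (k : Nat) (v : Int) (m : Nat) (h : k < xs.length) :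
    ((xs.set k v).take m).sum = (xs.take m).sum + (if k < m then v - xs.getD k 0 else 0) := by
  rw [List.take_set]
  by_cases hk : k < m
  · have hk2 : k < (xs.take m).length := by simp [List.length_take]; omega
    rw [sum_set_int _ _ _ hk2, if_pos hk]
    have hgd : (xs.take m).getD k 0 = xs.getD k 0 := by
      simp [List.getD, hk]
    rw [hgd]; ring
  · rw [List.set_eq_of_length_le (by simp [List.length_take]; omega), if_neg hk]; ring

theorem length_diffStep (A : List Int) (N : Int) (B : List Int) (i : Int) :
    (diffStep A N B i).length = B.length := by
  simp [diffStep, PySem.List.length_pySetD]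

theorem diffStep_take_sum (A : List Int) (N : Int) (B : List Int) (i : Int) (m : Nat)
    (hl0 : 0 ≤ pvL A i) (hl1 : pvL A i < (B.length : Int))
    (hr0 : 0 ≤ pvR A N i) (hr1 : pvR A N i < (B.length : Int)) :
    ((diffStep A N B i).take m).sum
      = (B.take m).sum + (if pvL A i < (m : Int) then 1 else 0)
        - (if pvR A N i < (m : Int) then 1 else 0) := by
  unfold diffStep
  rw [PySem.List.pySetD_of_nonneg B _ hl0, PySem.List.pyGetD_of_nonneg B _ hl0]
  set B1 := B.set (pvL A i).toNat (B.getD (pvL A i).toNat 0 + 1) with hB1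
  have hlen1 : B1.length = B.length := by simp [hB1]
  rw [PySem.List.pySetD_of_nonneg B1 _ hr0, PySem.List.pyGetD_of_nonneg B1 _ hr0]
  have hlt : (pvL A i).toNat < B.length := by omega
  have hrt : (pvR A N i).toNat < B1.length := by rw [hlen1]; omega
  rw [sum_take_set B1 _ _ m hrt, hB1, sum_take_set B _ _ m hlt]
  split_ifs <;> omega

theorem diff_fold_length (A : List Int) (N : Int) (l : List Int) :
    ∀ B : List Int, (l.foldl (diffStep A N) B).length = B.length := by
  induction l with
  | nil => intro B; rfl
  | cons a t ih => intro B; rw [List.foldl_cons, ih, length_diffStep]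

theorem diff_fold_take_sum (A : List Int) (N : Int) (m : Nat) :
    ∀ (a : Int) (B : List Int),
    (∀ i, a ≤ i → i < N →
        0 ≤ pvL A i ∧ pvL A i < (B.length : Int) ∧ 0 ≤ pvR A N i ∧ pvR A N i < (B.length : Int)) →
    (((PySem.List.pyRange a N 1).foldl (diffStep A N) B).take m).sum
      = (B.take m).sum
        + ((PySem.List.pyRange a N 1).map
            (fun i => (if pvL A i < (m : Int) then (1:Int) else 0)
                      - (if pvR A N i < (m : Int) then 1 else 0))).sum := by
  suffices h : ∀ (k : Nat) (a : Int) (B : List Int), (N - a).toNat ≤ k →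
      (∀ i, a ≤ i → i < N →
        0 ≤ pvL A i ∧ pvL A i < (B.length : Int) ∧ 0 ≤ pvR A N i ∧ pvR A N i < (B.length : Int)) →
      (((PySem.List.pyRange a N 1).foldl (diffStep A N) B).take m).sum
        = (B.take m).sum
          + ((PySem.List.pyRange a N 1).map
              (fun i => (if pvL A i < (m : Int) then (1:Int) else 0)
                        - (if pvR A N i < (m : Int) then 1 else 0))).sum by
    intro a B hh; exact h (N - a).toNat a B le_rfl hh
  intro k
  induction k with
  | zero =>
    intro a B hk hh
    rw [PySem.List.pyRange_one_eq_nil (by omega)]; simp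
  | succ k ih =>
    intro a B hk hh
    by_cases hab : a < N
    · obtain ⟨h1, h2, h3, h4⟩ := hh a le_rfl hab
      rw [PySem.List.pyRange_one_cons hab]
      simp only [List.foldl_cons, List.map_cons, List.sum_cons]
      rw [ih (a + 1) (diffStep A N B a) (by omega) ?hnext]
      · rw [diffStep_take_sum A N B a m h1 h2 h3 h4]; ring
      case hnext =>
        intro i hi1 hi2
        rw [length_diffStep]; exact hh i (by omega) hi2
    · rw [PySem.List.pyRange_one_eq_nil (by omega)]; simp

theorem incrRange_length (C : List Int) (l r : Int) : (incrRange C l r).length = C.length := by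
  unfold incrRange
  generalize PySem.List.pyRange l r 1 = js
  induction js generalizing C with
  | nil => rfl
  | cons a t ih => rw [List.foldl_cons, ih, PySem.List.length_pySetD]

theorem incrRange_getD (r : Int) :
    ∀ (k : Nat) (l : Int) (C : List Int), 0 ≤ l → r ≤ (C.length : Int) → (r - l).toNat ≤ k →
    ∀ j : Int, 0 ≤ j →
      PySem.List.pyGetD (incrRange C l r) j 0
        = PySem.List.pyGetD C j 0 + (if l ≤ j ∧ j < r then 1 else 0) := by
  intro k
  induction k with
  | zero =>
    intro l C hl hr hk j hj
    unfold incrRange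
    rw [PySem.List.pyRange_one_eq_nil (by omega)]
    rw [if_neg (by omega)]
    simp
  | succ k ih =>
    intro l C hl hr hk j hj
    by_cases hlr : l < r
    · unfold incrRange
      rw [PySem.List.pyRange_one_cons hlr, List.foldl_cons]
      have hres := ih (l + 1) (PySem.List.pySetD C l (PySem.List.pyGetD C l 0 + 1))
        (by omega) (by rw [PySem.List.length_pySetD]; omega) (by omega) j hj
      unfold incrRange at hres
      rw [hres]
      have hlcast : l = ((l.toNat : Nat) : Int) := by omega
      have hjcast : j = ((j.toNat : Nat) : Int) := by omega
      rw [hlcast, hjcast, PySem.List.pyGetD_pySetD_natCast C l.toNat j.toNat _ 0 (by omega)]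
      by_cases hjl : j.toNat = l.toNat
      · rw [if_pos hjl, show ((j.toNat : Nat) : Int) = ((l.toNat : Nat) : Int) from by omega,
            if_neg (by omega), if_pos (by constructor <;> omega)]
        ring
      · rw [if_neg hjl]
        split_ifs <;> omega
    · unfold incrRange
      rw [PySem.List.pyRange_one_eq_nil (by omega), if_neg (by omega)]
      simp

theorem cov_fold_getD (A : List Int) (N : Int) :
    ∀ (k : Nat) (a : Int) (C : List Int),
    N ≤ (C.length : Int) →
    (∀ i, a ≤ i → i < N → 0 ≤ pvL A i ∧ pvR A N i ≤ N) →
    (N - a).toNat ≤ k →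
    ∀ j : Int, 0 ≤ j →
      PySem.List.pyGetD ((PySem.List.pyRange a N 1).foldl (covStep A N) C) j 0
        = PySem.List.pyGetD C j 0
          + ((PySem.List.pyRange a N 1).map
              (fun i => if pvL A i ≤ j ∧ j < pvR A N i then (1:Int) else 0)).sum := by
  intro k
  induction k with
  | zero =>
    intro a C hC hh hk j hj
    rw [PySem.List.pyRange_one_eq_nil (by omega)]; simp
  | succ k ih =>
    intro a C hC hh hk j hj
    by_cases hab : a < N
    · obtain ⟨h1, h2⟩ := hh a le_rfl hab
      rw [PySem.List.pyRange_one_cons hab, List.foldl_cons,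
          List.map_cons, List.sum_cons]
      rw [ih (a + 1) (covStep A N C a)
            (by rw [show (covStep A N C a).length = C.length from incrRange_length _ _ _]; exact hC)
            (fun i hi1 hi2 => hh i (by omega) hi2) (by omega) j hj]
      rw [show covStep A N C a = incrRange C (pvL A a) (pvR A N a) from rfl]
      rw [incrRange_getD (pvR A N a) (pvR A N a - pvL A a).toNat (pvL A a) C h1 (by omega) le_rfl j hj]
      ring
    · rw [PySem.List.pyRange_one_eq_nil (by omega)]; simp

theorem psum_succ (D : List Int) (k : Int) (h1 : 1 ≤ k) (h2 : k < (D.length : Int)) :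
    psum D k = psum D (k - 1) + PySem.List.pyGetD D k 0 := by
  unfold psum
  have h3 : k.toNat < D.length := by omega
  rw [List.sum_take_succ D k.toNat h3, PySem.List.pyGetD_eq_getElem D 0 (by omega) h2,
      show (k - 1).toNat + 1 = k.toNat from by omega]

theorem fix_fold (A : List Int) (N : Int) (D : List Int) (hD : (D.length : Int) = N + 1) :
    ∀ (a : Int) (B : List Int) (x : Bool), 1 ≤ a →
    B.length = D.length →
    PySem.List.pyGetD B (a - 1) 0 = psum D (a - 1) →
    (∀ k, a ≤ k → k < N → PySem.List.pyGetD B k 0 = PySem.List.pyGetD D k 0) →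
    ((PySem.List.pyRange a N 1).foldl (fixStep A) (B, x)).2
      = (x && (PySem.List.pyRange a N 1).all (fun k => decide (pvA A k = psum D k))) := by
  suffices h : ∀ (c : Nat) (a : Int) (B : List Int) (x : Bool), 1 ≤ a →
      B.length = D.length →
      PySem.List.pyGetD B (a - 1) 0 = psum D (a - 1) →
      (∀ k, a ≤ k → k < N → PySem.List.pyGetD B k 0 = PySem.List.pyGetD D k 0) →
      (N - a).toNat ≤ c →
      ((PySem.List.pyRange a N 1).foldl (fixStep A) (B, x)).2
        = (x && (PySem.List.pyRange a N 1).all (fun k => decide (pvA A k = psum D k))) by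
    intro a B x ha hB hp hk
    exact h (N - a).toNat a B x ha hB hp hk le_rfl
  intro c
  induction c with
  | zero =>
    intro a B x ha hB hp hk hc
    rw [PySem.List.pyRange_one_eq_nil (by omega)]; simp
  | succ c ih =>
    intro a B x ha hB hp hk hc
    by_cases hab : a < N
    · have hlen : (a : Int) < (B.length : Int) := by
        rw [hB]; omega
      have ha0 : (0:Int) ≤ a := by omega
      rw [PySem.List.pyRange_one_cons hab, List.foldl_cons, List.all_cons]
      have hstep : fixStep A (B, x) a
          = (PySem.List.pySetD B a (psum D a),
             x && decide (pvA A a = psum D a)) := by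
        unfold fixStep
        have hBa : PySem.List.pyGetD B a 0 = PySem.List.pyGetD D a 0 := hk a le_rfl hab
        have hsum : PySem.List.pyGetD B a 0 + PySem.List.pyGetD B (a - 1) 0 = psum D a := by
          rw [hBa, hp, psum_succ D a ha (by omega)]; ring
        have hget : PySem.List.pyGetD (PySem.List.pySetD B a (psum D a)) a 0 = psum D a := by
          rw [show (a : Int) = ((a.toNat : Nat) : Int) from by omega,
              PySem.List.pyGetD_pySetD_natCast B a.toNat a.toNat _ 0 (by omega), if_pos rfl]
        simp only [hsum, hget]
      rw [hstep]
      rw [ih (a + 1) (PySem.List.pySetD B a (psum D a)) _ (by omega)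
            (by rw [PySem.List.length_pySetD]; exact hB)
            ?hpre ?hrest (by omega)]
      · rw [← Bool.and_assoc]
      case hpre =>
        rw [show a + 1 - 1 = a from by ring,
            show (a : Int) = ((a.toNat : Nat) : Int) from by omega,
            PySem.List.pyGetD_pySetD_natCast B a.toNat a.toNat _ 0 (by omega), if_pos rfl]
      case hrest =>
        intro k hk1 hk2
        rw [show (a : Int) = ((a.toNat : Nat) : Int) from by omega,
            show (k : Int) = ((k.toNat : Nat) : Int) from by omega,
            PySem.List.pyGetD_pySetD_natCast B a.toNat k.toNat _ 0 (by omega),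
            if_neg (by omega)]
        rw [show ((k.toNat : Nat) : Int) = k from by omega]
        exact hk k (by omega) hk2
    · rw [PySem.List.pyRange_one_eq_nil (by omega)]; simp

theorem cmp_fold (A : List Int) (C : List Int) :
    ∀ (l : List Int) (x : Bool),
    l.foldl (cmpStep A C) x = (x && l.all (fun k => decide (pvA A k = PySem.List.pyGetD C k 0))) := by
  intro l
  induction l with
  | nil => intro x; simp
  | cons a t ih =>
    intro x
    rw [List.foldl_cons, ih, List.all_cons, ← Bool.and_assoc]
    rfl

theorem all_congr_mem (l : List Int) (p q : Int → Bool) (h : ∀ x ∈ l, p x = q x) :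
    l.all p = l.all q := by
  induction l with
  | nil => rfl
  | cons a t ih => simp only [List.all_cons, h a (by simp), ih fun x hx => h x (by simp [hx])]

-- ===== VERDICT (by name: the statement is the Claim_ definition above) =====
theorem update_spec : Claim_equal_update := by
  intro A N hDom hPre
  obtain ⟨hN0, hN2, hNe, hNN⟩ := hPre
  unfold Spec_update update update_alt
  show (((PySem.List.pyRange 1 N 1).foldl (fixStep A)
      ((PySem.List.pyRange 0 N 1).foldl (diffStep A N) ((PySem.List.pyRange 0 (N+1) 1).map (fun _ => 0)),
       decide (pvA A 0 = PySem.List.pyGetD ((PySem.List.pyRange 0 N 1).foldl (diffStep A N) ((PySem.List.pyRange 0 (N+1) 1).map (fun _ => 0))) 0 0))).2)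
    = ((PySem.List.pyRange 1 N 1).foldl
        (cmpStep A ((PySem.List.pyRange 0 N 1).foldl (covStep A N) ((PySem.List.pyRange 0 (N+1) 1).map (fun _ => 0))))
        (decide (pvA A 0 = PySem.List.pyGetD ((PySem.List.pyRange 0 N 1).foldl (covStep A N) ((PySem.List.pyRange 0 (N+1) 1).map (fun _ => 0))) 0 0)))
  by_cases hNz : N = 0
  · subst hNz
    rw [PySem.List.pyRange_one_eq_nil (a := 0) (b := 0) le_rfl,
        PySem.List.pyRange_one_eq_nil (a := 1) (b := 0) (by omega)]
    rfl
  have hN1 : 1 ≤ N := by omega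
  set B0 : List Int := (PySem.List.pyRange 0 (N+1) 1).map (fun _ => 0) with hB0
  set B1 : List Int := (PySem.List.pyRange 0 N 1).foldl (diffStep A N) B0 with hB1
  set C : List Int := (PySem.List.pyRange 0 N 1).foldl (covStep A N) B0 with hC
  have hA : ∀ i : Int, 0 ≤ i → i < N → 0 ≤ pvA A i := by
    intro i h1 h2
    have hi : i.toNat < A.length := by omega
    have hv : pvA A i = A[i.toNat] := PySem.List.pyGetD_eq_getElem A 0 h1 (by omega)
    rw [hv]
    have h4 : i.toNat < (A.take N.toNat).length := by simp [List.length_take]; omega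
    have h5 := List.getElem_mem h4
    have h6 : (A.take N.toNat)[i.toNat]'h4 = A[i.toNat]'hi := by
      simp [List.getElem_take]
    rw [h6] at h5
    exact hNN _ h5
  have hbnd : ∀ i : Int, 0 ≤ i → i < N →
      0 ≤ pvL A i ∧ pvL A i ≤ i ∧ i < pvR A N i ∧ pvR A N i ≤ N := by
    intro i h1 h2
    have ha := hA i h1 h2
    unfold pvL pvR
    exact ⟨le_max_left _ _, max_le h1 (by omega), lt_min h2 (by omega), min_le_left _ _⟩
  have hlenB0 : (B0.length : Int) = N + 1 := by
    rw [hB0]; simp [PySem.List.length_pyRange_one]; omega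
  have hlenB1 : (B1.length : Int) = N + 1 := by
    rw [hB1, diff_fold_length]; exact hlenB0
  have hzero : ∀ m : Nat, ((B0.take m).sum) = 0 := by
    intro m
    apply List.sum_eq_zero
    intro x hx
    have hx2 := List.mem_of_mem_take hx
    rw [hB0] at hx2
    obtain ⟨i, _, hi2⟩ := List.mem_map.1 hx2
    exact hi2.symm
  have hpsum : ∀ j : Int, 0 ≤ j → j < N → psum B1 j = cov A N j := by
    intro j hj1 hj2
    unfold psum
    rw [hB1, diff_fold_take_sum A N (j.toNat + 1) 0 B0 ?bnds]
    case bnds =>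
      intro i h1 h2
      have hb := hbnd i h1 h2
      exact ⟨hb.1, by omega, by omega, by omega⟩
    rw [hzero]
    unfold cov
    have hmapeq : (PySem.List.pyRange 0 N 1).map
          (fun i => (if pvL A i < ((j.toNat + 1 : Nat) : Int) then (1:Int) else 0)
                    - (if pvR A N i < ((j.toNat + 1 : Nat) : Int) then 1 else 0))
        = (PySem.List.pyRange 0 N 1).map
          (fun i => if pvL A i ≤ j ∧ j < pvR A N i then (1:Int) else 0) := by
      apply List.map_congr_left
      intro i hi
      have hib := (PySem.List.mem_pyRange_one).1 hi
      have hb := hbnd i hib.1 hib.2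
      have hcast : ((j.toNat + 1 : Nat) : Int) = j + 1 := by omega
      rw [hcast]
      split_ifs <;> omega
    rw [hmapeq]
    ring
  have hlenC0 : N ≤ (B0.length : Int) := by omega
  have hC0get : ∀ j : Int, 0 ≤ j → PySem.List.pyGetD B0 j 0 = 0 := by
    intro j hj
    by_cases hjN : j < N + 1
    · rw [hB0]; exact PySem.List.pyGetD_map_pyRange_of_nonneg _ (N+1) j 0 hj hjN
    · rw [PySem.List.pyGetD_of_nonneg _ _ hj, List.getD_eq_default]
      omega
  have hCget : ∀ j : Int, 0 ≤ j → j < N → PySem.List.pyGetD C j 0 = cov A N j := by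
    intro j hj1 hj2
    rw [hC, cov_fold_getD A N N.toNat 0 B0 hlenC0
          (fun i h1 h2 => ⟨(hbnd i h1 h2).1, (hbnd i h1 h2).2.2.2⟩) (by omega) j hj1,
        hC0get j hj1]
    unfold cov
    ring
  have hpsum0 : psum B1 0 = PySem.List.pyGetD B1 0 0 := by
    unfold psum
    have hl : 0 < B1.length := by omega
    rw [show (0:Int).toNat + 1 = 0 + 1 from rfl, List.sum_take_succ B1 0 hl,
        PySem.List.pyGetD_eq_getElem B1 0 (by omega) (by omega)]
    simp
  rw [fix_fold A N B1 hlenB1 1 B1 _ le_rfl rfl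
        (by rw [show (1:Int) - 1 = 0 from rfl]; exact hpsum0.symm) (fun k _ _ => rfl)]
  rw [cmp_fold A C (PySem.List.pyRange 1 N 1) _]
  congr 1
  · have hx0 : PySem.List.pyGetD B1 0 0 = PySem.List.pyGetD C 0 0 := by
      rw [← hpsum0, hpsum 0 le_rfl (by omega), hCget 0 le_rfl (by omega)]
    rw [hx0]
  · apply all_congr_mem
    intro x hx
    have hb := (PySem.List.mem_pyRange_one).1 hx
    rw [hpsum x (by omega) hb.2, hCget x (by omega) hb.2]
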